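-- pv_equiv track=rewrite | github.com/ugenkudupudiqbnox/oss-governance-for-mem0 | mem0_governance/security/__init__.py | validate_secret_strength
-- ===== SOURCE A (Python) =====
-- def validate_secret_strength(secret: str, min_length: int = 32) -> bool:
--     """
--     Validate that a secret meets minimum security requirements.
--
--     Args:
--         secret: Secret to validate
--         min_length: Minimum required length
--
--     Returns:
--         True if secret meets requirements
--     """
--     if len(secret) < min_length:
--         return False
--
--     # Check for complexity (at least 3 character types)
--     has_lower = any(c.islower() for c in secret)
--     has_upper = any(c.isupper() for c in secret)
--     has_digit = any(c.isdigit() for c in secret)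
--     has_special = any(not c.isalnum() for c in secret)
--
--     complexity = sum([has_lower, has_upper, has_digit, has_special])
--     return complexity >= 3
-- ===== SOURCE B (Python) =====
-- def validate_secret_strength(secret: str, min_length: int = 32) -> bool:
--     if len(secret) < min_length:
--         return False
--     # Each character belongs to exactly one class: lower / upper / digit / special
--     # (special = everything that is not alphanumeric). The complexity score is
--     # therefore the number of DISTINCT classes occurring in the secret.
--     def classify(c):
--         if c.islower():
--             return 0
--         if c.isupper():
--             return 1
--         if c.isdigit():
--             return 2
--         return 3
--     return len({classify(c) for c in secret}) >= 3
-- ===== Notes on version B (the rewrite author's own statement) =====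
-- stated objective: faster
-- what changed: Instead of testing four boolean class predicates with four any() generator scans, B maps every character once to a single class tag (lower/upper/digit/special partition the alphabet), collects the distinct tags in a set, and compares the set's cardinality with 3.
import Mathlib
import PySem

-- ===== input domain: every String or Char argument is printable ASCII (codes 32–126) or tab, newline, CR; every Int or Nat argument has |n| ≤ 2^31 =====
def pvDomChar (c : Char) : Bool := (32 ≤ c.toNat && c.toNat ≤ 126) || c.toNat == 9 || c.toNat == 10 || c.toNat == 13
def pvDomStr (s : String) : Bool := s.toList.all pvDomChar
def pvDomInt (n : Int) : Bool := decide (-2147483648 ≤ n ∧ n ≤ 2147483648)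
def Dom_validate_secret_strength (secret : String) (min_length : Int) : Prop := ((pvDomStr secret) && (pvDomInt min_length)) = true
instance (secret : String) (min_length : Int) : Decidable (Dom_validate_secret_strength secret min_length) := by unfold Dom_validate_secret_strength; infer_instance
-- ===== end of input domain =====

-- B replaces A's four any() predicate scans by classifying each character into one of
-- four disjoint classes and counting the distinct class tags in a set (alternative decomposition).


-- ===== PORT A =====
-- A: length guard, then four separate any() scans over the characters.
def validate_secret_strength (secret : String) (min_length : Int) : Bool :=
  if PySem.Str.len secret < min_length then false
  else
    let has_lower := secret.toList.any PySem.Chars.islower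
    let has_upper := secret.toList.any PySem.Chars.isupper
    let has_digit := secret.toList.any PySem.Chars.isdigit
    let has_special := secret.toList.any (fun c => !PySem.Chars.isalnum c)
    let complexity : Int :=
      (if has_lower then 1 else 0) + (if has_upper then 1 else 0) +
      (if has_digit then 1 else 0) + (if has_special then 1 else 0)
    decide (complexity ≥ 3)

-- ===== PORT B =====
-- B: classify each character into one of four disjoint classes; the set of distinct tags
-- present must have at least 3 elements.
def vssClassify (c : Char) : Int :=
  if PySem.Chars.islower c then 0
  else if PySem.Chars.isupper c then 1
  else if PySem.Chars.isdigit c then 2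
  else 3

def validate_secret_strength_alt (secret : String) (min_length : Int) : Bool :=
  if PySem.Str.len secret < min_length then false
  else
    decide ((3 : Int) ≤ ((PySem.Set.ofList (secret.toList.map vssClassify)).length : Int))

-- ===== PRECONDITION & SPEC =====
def Spec_validate_secret_strength (secret : String) (min_length : Int) (out : Bool) : Prop := out = validate_secret_strength_alt secret min_length
instance (secret : String) (min_length : Int) (out : Bool) : Decidable (Spec_validate_secret_strength secret min_length out) := by unfold Spec_validate_secret_strength; infer_instance

-- ===== CLAIM (what is proved, stated in full; the proofs are below) =====
def Claim_equal_validate_secret_strength : Prop := ∀ (secret : String) (min_length : Int), Dom_validate_secret_strength secret min_length → Spec_validate_secret_strength secret min_length (validate_secret_strength secret min_length)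

-- ===== LEMMAS AND PROOFS =====

-- per-character facts: vssClassify hits each tag exactly on the corresponding predicate
theorem vssClassify_eq_zero (c : Char) : vssClassify c = 0 ↔ PySem.Chars.islower c = true := by
  unfold vssClassify; split_ifs <;> simp_all

theorem vssClassify_eq_one (c : Char) : vssClassify c = 1 ↔ PySem.Chars.isupper c = true := by
  unfold vssClassify
  have h : PySem.Chars.isupper c = true → PySem.Chars.islower c = false := by
    simp [PySem.Chars.isupper, PySem.Chars.islower, Char.le_def, UInt32.le_iff_toNat_le]
    omega
  split_ifs with h1 h2 h3 <;> simp_all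

theorem vssClassify_eq_two (c : Char) : vssClassify c = 2 ↔ PySem.Chars.isdigit c = true := by
  unfold vssClassify
  have h : PySem.Chars.isdigit c = true →
      PySem.Chars.islower c = false ∧ PySem.Chars.isupper c = false := by
    simp [PySem.Chars.isupper, PySem.Chars.islower, PySem.Chars.isdigit, Char.le_def,
      UInt32.le_iff_toNat_le]
    omega
  split_ifs <;> simp_all

theorem vssClassify_eq_three (c : Char) : vssClassify c = 3 ↔ (!PySem.Chars.isalnum c) = true := by
  unfold vssClassify
  simp only [PySem.Chars.isalnum, PySem.Chars.isalpha]
  split_ifs <;> simp_all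

theorem vssClassify_cases (c : Char) :
    vssClassify c = 0 ∨ vssClassify c = 1 ∨ vssClassify c = 2 ∨ vssClassify c = 3 := by
  unfold vssClassify; split_ifs <;> simp

-- cardinality of a nodup list with elements among {0,1,2,3} from its membership flags
theorem length_by_flags (l : List Int) (hn : l.Nodup)
    (hsub : ∀ i ∈ l, i = 0 ∨ i = 1 ∨ i = 2 ∨ i = 3)
    (a0 a1 a2 a3 : Bool)
    (h0 : (0 : Int) ∈ l ↔ a0 = true) (h1 : (1 : Int) ∈ l ↔ a1 = true)
    (h2 : (2 : Int) ∈ l ↔ a2 = true) (h3 : (3 : Int) ∈ l ↔ a3 = true) :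
    (l.length : Int) =
      (if a0 then 1 else 0) + (if a1 then 1 else 0) +
      (if a2 then 1 else 0) + (if a3 then 1 else 0) := by
  have key : ∀ (m : List Int), m.Nodup → (∀ i, i ∈ l ↔ i ∈ m) → l.length = m.length := by
    intro m hm hiff
    exact ((List.perm_ext_iff_of_nodup hn hm).2 hiff).length_eq
  cases a0 <;> cases a1 <;> cases a2 <;> cases a3 <;> simp only [Bool.false_eq_true, iff_false, iff_true] at h0 h1 h2 h3
  case false.false.false.false =>
    rw [key [] (by decide) (fun i => by
      constructor
      · intro hi; rcases hsub i hi with rfl | rfl | rfl | rfl <;> simp_all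
      · intro hi; simp at hi)]
    decide
  case false.false.false.true =>
    rw [key [3] (by decide) (fun i => by
      constructor
      · intro hi; rcases hsub i hi with rfl | rfl | rfl | rfl <;> simp_all
      · intro hi; simp at hi; subst hi; exact h3)]
    decide
  case false.false.true.false =>
    rw [key [2] (by decide) (fun i => by
      constructor
      · intro hi; rcases hsub i hi with rfl | rfl | rfl | rfl <;> simp_all
      · intro hi; simp at hi; subst hi; exact h2)]
    decide
  case false.false.true.true =>
    rw [key [2, 3] (by decide) (fun i => by
      constructor
      · intro hi; rcases hsub i hi with rfl | rfl | rfl | rfl <;> simp_all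
      · intro hi; rcases List.mem_pair.mp hi with rfl | rfl
        · exact h2
        · exact h3)]
    decide
  case false.true.false.false =>
    rw [key [1] (by decide) (fun i => by
      constructor
      · intro hi; rcases hsub i hi with rfl | rfl | rfl | rfl <;> simp_all
      · intro hi; simp at hi; subst hi; exact h1)]
    decide
  case false.true.false.true =>
    rw [key [1, 3] (by decide) (fun i => by
      constructor
      · intro hi; rcases hsub i hi with rfl | rfl | rfl | rfl <;> simp_all
      · intro hi; rcases List.mem_pair.mp hi with rfl | rfl
        · exact h1
        · exact h3)]
    decide
  case false.true.true.false =>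
    rw [key [1, 2] (by decide) (fun i => by
      constructor
      · intro hi; rcases hsub i hi with rfl | rfl | rfl | rfl <;> simp_all
      · intro hi; rcases List.mem_pair.mp hi with rfl | rfl
        · exact h1
        · exact h2)]
    decide
  case false.true.true.true =>
    rw [key [1, 2, 3] (by decide) (fun i => by
      constructor
      · intro hi; rcases hsub i hi with rfl | rfl | rfl | rfl <;> simp_all
      · intro hi; simp at hi; rcases hi with rfl | rfl | rfl
        · exact h1
        · exact h2
        · exact h3)]
    decide
  case true.false.false.false =>
    rw [key [0] (by decide) (fun i => by
      constructor
      · intro hi; rcases hsub i hi with rfl | rfl | rfl | rfl <;> simp_all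
      · intro hi; simp at hi; subst hi; exact h0)]
    decide
  case true.false.false.true =>
    rw [key [0, 3] (by decide) (fun i => by
      constructor
      · intro hi; rcases hsub i hi with rfl | rfl | rfl | rfl <;> simp_all
      · intro hi; rcases List.mem_pair.mp hi with rfl | rfl
        · exact h0
        · exact h3)]
    decide
  case true.false.true.false =>
    rw [key [0, 2] (by decide) (fun i => by
      constructor
      · intro hi; rcases hsub i hi with rfl | rfl | rfl | rfl <;> simp_all
      · intro hi; rcases List.mem_pair.mp hi with rfl | rfl
        · exact h0
        · exact h2)]
    decide
  case true.false.true.true =>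
    rw [key [0, 2, 3] (by decide) (fun i => by
      constructor
      · intro hi; rcases hsub i hi with rfl | rfl | rfl | rfl <;> simp_all
      · intro hi; simp at hi; rcases hi with rfl | rfl | rfl
        · exact h0
        · exact h2
        · exact h3)]
    decide
  case true.true.false.false =>
    rw [key [0, 1] (by decide) (fun i => by
      constructor
      · intro hi; rcases hsub i hi with rfl | rfl | rfl | rfl <;> simp_all
      · intro hi; rcases List.mem_pair.mp hi with rfl | rfl
        · exact h0
        · exact h1)]
    decide
  case true.true.false.true =>
    rw [key [0, 1, 3] (by decide) (fun i => by
      constructor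
      · intro hi; rcases hsub i hi with rfl | rfl | rfl | rfl <;> simp_all
      · intro hi; simp at hi; rcases hi with rfl | rfl | rfl
        · exact h0
        · exact h1
        · exact h3)]
    decide
  case true.true.true.false =>
    rw [key [0, 1, 2] (by decide) (fun i => by
      constructor
      · intro hi; rcases hsub i hi with rfl | rfl | rfl | rfl <;> simp_all
      · intro hi; simp at hi; rcases hi with rfl | rfl | rfl
        · exact h0
        · exact h1
        · exact h2)]
    decide
  case true.true.true.true =>
    rw [key [0, 1, 2, 3] (by decide) (fun i => by
      constructor
      · intro hi; rcases hsub i hi with rfl | rfl | rfl | rfl <;> simp_all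
      · intro hi; simp at hi; rcases hi with rfl | rfl | rfl | rfl
        · exact h0
        · exact h1
        · exact h2
        · exact h3)]
    decide

-- ===== VERDICT (by name: the statement is the Claim_ definition above) =====
theorem validate_secret_strength_spec : Claim_equal_validate_secret_strength := by
  intro secret min_length _
  unfold Spec_validate_secret_strength validate_secret_strength validate_secret_strength_alt
  by_cases hlen : PySem.Str.len secret < min_length
  · rw [if_pos hlen, if_pos hlen]
  · rw [if_neg hlen, if_neg hlen]
    set cs := secret.toList with hcs
    set S : List Int := PySem.Set.ofList (cs.map vssClassify) with hS
    have hn : S.Nodup := PySem.Set.nodup_ofList _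
    have hmem : ∀ i : Int, i ∈ S ↔ i ∈ cs.map vssClassify := fun i => PySem.Set.mem_ofList ..
    have hsub : ∀ i ∈ S, i = 0 ∨ i = 1 ∨ i = 2 ∨ i = 3 := by
      intro i hi
      rcases List.mem_map.mp ((hmem i).mp hi) with ⟨c, _, rfl⟩
      exact vssClassify_cases c
    have h0 : (0 : Int) ∈ S ↔ cs.any PySem.Chars.islower = true := by
      rw [hmem]; simp only [List.mem_map, List.any_eq_true]
      exact ⟨fun ⟨c, hc, he⟩ => ⟨c, hc, (vssClassify_eq_zero c).mp he⟩,
             fun ⟨c, hc, he⟩ => ⟨c, hc, (vssClassify_eq_zero c).mpr he⟩⟩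
    have h1 : (1 : Int) ∈ S ↔ cs.any PySem.Chars.isupper = true := by
      rw [hmem]; simp only [List.mem_map, List.any_eq_true]
      exact ⟨fun ⟨c, hc, he⟩ => ⟨c, hc, (vssClassify_eq_one c).mp he⟩,
             fun ⟨c, hc, he⟩ => ⟨c, hc, (vssClassify_eq_one c).mpr he⟩⟩
    have h2 : (2 : Int) ∈ S ↔ cs.any PySem.Chars.isdigit = true := by
      rw [hmem]; simp only [List.mem_map, List.any_eq_true]
      exact ⟨fun ⟨c, hc, he⟩ => ⟨c, hc, (vssClassify_eq_two c).mp he⟩,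
             fun ⟨c, hc, he⟩ => ⟨c, hc, (vssClassify_eq_two c).mpr he⟩⟩
    have h3 : (3 : Int) ∈ S ↔ cs.any (fun c => !PySem.Chars.isalnum c) = true := by
      rw [hmem]; simp only [List.mem_map, List.any_eq_true]
      exact ⟨fun ⟨c, hc, he⟩ => ⟨c, hc, (vssClassify_eq_three c).mp he⟩,
             fun ⟨c, hc, he⟩ => ⟨c, hc, (vssClassify_eq_three c).mpr he⟩⟩
    have hlen' := length_by_flags S hn hsub _ _ _ _ h0 h1 h2 h3
    rw [hlen']
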